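-- pv_equiv track=rewrite | github.com/Haskucy/caturjawa | caturjawa/helper/state_generation.py | base10_to_base3
-- ===== SOURCE A (Python) =====
-- def base10_to_base3(num):
--     """Convert base 10 integer to base 3.
--
--     Parameters
--     ----------
--     num : int
--         An integer in base 10
--
--     Returns
--     -------
--     String :
--         A string which is base 3 integer form from input
--     """
--
--     if num < 0:
--         return "-" + str(base10_to_base3(num*-1))
--     if num == 0:
--         return "0"*9
--     numbers = []
--     while num:
--         num, r = divmod(num, 3)
--         numbers.append(str(r))
--     hasil = ''.join(reversed(numbers))
--     zeroes = "0"*(9-len(hasil))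
--     return zeroes + hasil
-- ===== SOURCE B (Python) =====
-- def base10_to_base3(num):
--     """Convert base 10 integer to base 3 (9-digit zero-padded string)."""
--     if num < 0:
--         return "-" + base10_to_base3(-num)
--
--     def conv(n):
--         return "" if n == 0 else conv(n // 3) + str(n % 3)
--
--     return conv(num).zfill(9)
-- ===== Notes on version B (the rewrite author's own statement) =====
-- stated objective: simpler
-- what changed: The iterative divmod loop with a digit list, reversal, manual zero-padding and an explicit zero special case is replaced by a linear recursion conv(n)=conv(n//3)+str(n%3) whose empty result for 0 makes zfill(9) cover both padding and the zero case.
import Mathlib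
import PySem

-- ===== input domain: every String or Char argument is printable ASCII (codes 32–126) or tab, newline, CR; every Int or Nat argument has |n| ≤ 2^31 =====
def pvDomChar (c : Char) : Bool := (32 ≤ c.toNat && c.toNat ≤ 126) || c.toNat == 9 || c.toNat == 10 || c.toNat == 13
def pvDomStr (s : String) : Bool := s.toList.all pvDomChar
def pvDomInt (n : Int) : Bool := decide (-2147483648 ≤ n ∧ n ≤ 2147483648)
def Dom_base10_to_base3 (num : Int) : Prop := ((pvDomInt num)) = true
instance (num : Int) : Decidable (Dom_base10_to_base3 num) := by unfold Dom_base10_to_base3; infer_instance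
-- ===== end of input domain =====

-- B replaces A's divmod loop + digit list + reverse + manual padding + zero special case by a
-- linear recursion conv(n) = conv(n//3) + str(n%3) followed by zfill(9) (objective: simpler).

-- ===== PORT A =====
-- the 'while num:' loop; the loop is only entered with num > 0, the '≤ 0' guard merely makes it total
def b3loop (num : Int) (numbers : List String) : List String :=
  if _h : num ≤ 0 then numbers
  else b3loop (PySem.Int.floordiv num 3)
              (numbers ++ [PySem.Int.toStr (PySem.Int.mod num 3)])
termination_by num.toNat
decreasing_by
  rw [PySem.Int.floordiv_eq_ediv_of_pos (by norm_num : (0:Int) < 3)]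
  omega

def base10_to_base3 (num : Int) : String :=
  if _h : num < 0 then "-" ++ base10_to_base3 (-num)
  else if num = 0 then String.ofList (PySem.List.pyRepeat ['0'] 9)
  else
    let hasil := PySem.Str.join "" ((b3loop num []).reverse)
    let zeroes := String.ofList (PySem.List.pyRepeat ['0'] (9 - (PySem.Str.len hasil : Int)))
    zeroes ++ hasil
termination_by (if num < 0 then 1 else 0)
decreasing_by simp_all; omega

-- ===== PORT B =====
-- conv(n): '' if n == 0 else conv(n // 3) + str(n % 3); never called with n < 0, the guard makes it total
def b3conv (n : Int) : String :=
  if _h : n ≤ 0 then ""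
  else b3conv (PySem.Int.floordiv n 3) ++ PySem.Int.toStr (PySem.Int.mod n 3)
termination_by n.toNat
decreasing_by
  rw [PySem.Int.floordiv_eq_ediv_of_pos (by norm_num : (0:Int) < 3)]
  omega

def base10_to_base3_alt (num : Int) : String :=
  if _h : num < 0 then "-" ++ base10_to_base3_alt (-num)
  else PySem.Str.zfill (b3conv num) 9
termination_by (if num < 0 then 1 else 0)
decreasing_by simp_all; omega

-- ===== PRECONDITION & SPEC =====
def Spec_base10_to_base3 (num : Int) (out : String) : Prop := out = base10_to_base3_alt num
instance (num : Int) (out : String) : Decidable (Spec_base10_to_base3 num out) := by unfold Spec_base10_to_base3; infer_instance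

-- ===== CLAIM (what is proved, stated in full; the proofs are below) =====
def Claim_equal_base10_to_base3 : Prop := ∀ (num : Int), Dom_base10_to_base3 num → Spec_base10_to_base3 num (base10_to_base3 num)

-- ===== LEMMAS AND PROOFS =====

-- ''.join(x :: l) prepends x
theorem join_empty_cons (x : String) (l : List String) :
    PySem.Str.join "" (x :: l) = x ++ PySem.Str.join "" l := by
  apply String.toList_inj.mp
  simp [PySem.Str.toList_join, PySem.Chars.join]
  cases l <;> simp [List.intercalate]

-- every character b3conv produces is a base-3 digit (in particular never a sign)
theorem b3conv_digits (n : Int) : ∀ c ∈ (b3conv n).toList, c = '0' ∨ c = '1' ∨ c = '2' := by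
  induction n using b3conv.induct with
  | case1 n h =>
      rw [b3conv, dif_pos h]; simp
  | case2 n h ih =>
      rw [b3conv, dif_neg h]
      intro c hc
      rw [String.toList_append] at hc
      rcases List.mem_append.mp hc with h1 | h2
      · exact ih c h1
      · have hm0 : 0 ≤ PySem.Int.mod n 3 := PySem.Int.mod_nonneg _ (by norm_num)
        have hm3 : PySem.Int.mod n 3 < 3 := PySem.Int.mod_lt _ (by norm_num)
        have : PySem.Int.mod n 3 = 0 ∨ PySem.Int.mod n 3 = 1 ∨ PySem.Int.mod n 3 = 2 := by omega
        rw [PySem.Int.toList_toStr] at h2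
        rcases this with h | h | h <;> rw [h] at h2
        · rw [show PySem.Int.toChars 0 = ['0'] from by decide] at h2; simp at h2; tauto
        · rw [show PySem.Int.toChars 1 = ['1'] from by decide] at h2; simp at h2; tauto
        · rw [show PySem.Int.toChars 2 = ['2'] from by decide] at h2; simp at h2; tauto

-- the joined, reversed loop output of A equals B's recursive conversion
theorem loop_join (n : Int) (acc : List String) :
    PySem.Str.join "" ((b3loop n acc).reverse) = b3conv n ++ PySem.Str.join "" acc.reverse := by
  induction n, acc using b3loop.induct with
  | case1 n acc h =>
      rw [b3loop, dif_pos h, b3conv, dif_pos h, String.empty_append]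
  | case2 n acc h ih =>
      rw [b3loop, dif_neg h, b3conv, dif_neg h, ih]
      rw [List.reverse_append, List.reverse_singleton, List.singleton_append,
          join_empty_cons, String.append_assoc]

-- manual left zero-padding equals zfill on a sign-free character list
theorem pad_eq_zfill_chars (cs : List Char) (hs : ∀ c ∈ cs, c = '0' ∨ c = '1' ∨ c = '2') :
    List.replicate ((9:Int) - (cs.length : Int)).toNat '0' ++ cs = PySem.Chars.zfill cs 9 := by
  by_cases hlen : (9:Int) ≤ (cs.length : Int)
  · rw [PySem.Chars.zfill.eq_def, if_pos hlen, show ((9:Int) - (cs.length : Int)).toNat = 0 from by omega]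
    simp
  · cases cs with
    | nil => simp [PySem.Chars.zfill]
    | cons c rest =>
        have hc := hs c (by simp)
        have hnot : ¬ (c = '+' ∨ c = '-') := by rcases hc with h|h|h <;> simp [h]
        simp only [PySem.Chars.zfill, if_neg hlen, if_neg hnot]
        congr 1
        congr 1
        simp; omega

theorem pad_eq_zfill (s : String) (hs : ∀ c ∈ s.toList, c = '0' ∨ c = '1' ∨ c = '2') :
    String.ofList (PySem.List.pyRepeat ['0'] (9 - (PySem.Str.len s : Int))) ++ s
      = PySem.Str.zfill s 9 := by
  apply String.toList_inj.mp
  rw [String.toList_append, String.toList_ofList, PySem.List.pyRepeat_singleton,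
      PySem.Str.toList_zfill]
  have hl : (PySem.Str.len s : Int) = (s.toList.length : Int) := by
    simp [PySem.Str.len_eq]
  rw [hl]
  exact pad_eq_zfill_chars s.toList hs

theorem nonneg_case (num : Int) (h : 0 ≤ num) :
    base10_to_base3 num = base10_to_base3_alt num := by
  rw [base10_to_base3, base10_to_base3_alt, dif_neg (by omega : ¬ num < 0),
      dif_neg (by omega : ¬ num < 0)]
  by_cases h0 : num = 0
  · rw [if_pos h0, h0, b3conv, dif_pos (by omega : (0:Int) ≤ 0)]
    decide
  · rw [if_neg h0]
    have hj : PySem.Str.join "" ((b3loop num []).reverse) = b3conv num := by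
      rw [loop_join]
      show b3conv num ++ PySem.Str.join "" [] = b3conv num
      rw [show PySem.Str.join "" ([] : List String) = "" from rfl, String.append_empty]
    simp only [hj]
    exact pad_eq_zfill _ (b3conv_digits num)

-- ===== VERDICT (by name: the statement is the Claim_ definition above) =====
theorem base10_to_base3_spec : Claim_equal_base10_to_base3 := by
  intro num _hd
  unfold Spec_base10_to_base3
  by_cases h : num < 0
  · rw [base10_to_base3, base10_to_base3_alt, dif_pos h, dif_pos h,
        nonneg_case (-num) (by omega)]
  · exact nonneg_case num (by omega)
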